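-- pv_equiv track=rewrite | github.com/Jayaway/Alpha-Hunter-Framework | deepalpha_runtime/monitor.py | build_oil_search_tasks
-- ===== SOURCE A (Python) =====
-- from typing import Iterable
--
-- def build_oil_search_tasks(oil_rules: Iterable[tuple]) -> list[str]:
--     s_rules = [rule for rule in oil_rules if len(rule) >= 4 and rule[3] == "S"]
--
--     supply_terms = _phrases_from_rules(
--         s_rules,
--         preferred_heads=("OPEC", "OPEC+", "Saudi", "EIA", "API", "crude"),
--         limit=4,
--     )
--     geopolitics_terms = _phrases_from_rules(
--         s_rules,
--         preferred_heads=("Iran", "Hormuz", "Strait", "Red Sea", "tanker"),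
--         limit=4,
--     )
--
--     if not supply_terms:
--         supply_terms = ['"OPEC cut"', '"EIA inventory"', '"crude supply"']
--     if not geopolitics_terms:
--         geopolitics_terms = ['"Iran Hormuz"', '"Red Sea attack"', '"tanker attack"']
--
--     return [
--         f"({' OR '.join(supply_terms)}) (oil OR crude OR Brent OR WTI)",
--         f"({' OR '.join(geopolitics_terms)}) (oil OR crude OR tanker)",
--     ]
--
-- def _phrases_from_rules(rules: list[tuple], preferred_heads: tuple[str, ...], limit: int) -> list[str]:
--     phrases = []
--     for head in preferred_heads:
--         for rule in rules:
--             if len(rule) < 2: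
--                 continue
--             if str(rule[0]).lower() != head.lower():
--                 continue
--             phrase = f"{rule[0]} {rule[1]}".strip()
--             phrases.append(_quote_query_phrase(phrase))
--             if len(phrases) >= limit:
--                 return phrases
--     return phrases
--
-- def _quote_query_phrase(phrase: str) -> str:
--     escaped = phrase.replace('"', "")
--     return f'"{escaped}"'
-- ===== SOURCE B (Python) =====
-- def build_oil_search_tasks(oil_rules):
--     # One pass: group already-quoted phrases by lowercased head (only S-rules).
--     groups = {}
--     for rule in oil_rules:
--         if len(rule) >= 4 and rule[3] == "S":
--             key = str(rule[0]).lower()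
--             phrase = f"{rule[0]} {rule[1]}".strip().replace('"', '')
--             groups[key] = groups.get(key, []) + ['"' + phrase + '"']
--
--     def pick(heads, limit):
--         out = []
--         for head in heads:
--             for p in groups.get(head.lower(), []):
--                 out.append(p)
--                 if len(out) >= limit:
--                     return out
--         return out
--
--     supply = pick(("OPEC", "OPEC+", "Saudi", "EIA", "API", "crude"), 4) \
--         or ['"OPEC cut"', '"EIA inventory"', '"crude supply"']
--     geo = pick(("Iran", "Hormuz", "Strait", "Red Sea", "tanker"), 4) \
--         or ['"Iran Hormuz"', '"Red Sea attack"', '"tanker attack"']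
--     return [
--         f"({' OR '.join(supply)}) (oil OR crude OR Brent OR WTI)",
--         f"({' OR '.join(geo)}) (oil OR crude OR tanker)",
--     ]
-- ===== Notes on version B (the rewrite author's own statement) =====
-- stated objective: alternative
-- what changed: B replaces the per-head rescans of the rule list (and the intermediate s_rules list) with a single grouping pass that builds a dict from lowercased head to its already-quoted phrases, then each query just walks its preferred heads' group lists with the cross-head limit.
import Mathlib
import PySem

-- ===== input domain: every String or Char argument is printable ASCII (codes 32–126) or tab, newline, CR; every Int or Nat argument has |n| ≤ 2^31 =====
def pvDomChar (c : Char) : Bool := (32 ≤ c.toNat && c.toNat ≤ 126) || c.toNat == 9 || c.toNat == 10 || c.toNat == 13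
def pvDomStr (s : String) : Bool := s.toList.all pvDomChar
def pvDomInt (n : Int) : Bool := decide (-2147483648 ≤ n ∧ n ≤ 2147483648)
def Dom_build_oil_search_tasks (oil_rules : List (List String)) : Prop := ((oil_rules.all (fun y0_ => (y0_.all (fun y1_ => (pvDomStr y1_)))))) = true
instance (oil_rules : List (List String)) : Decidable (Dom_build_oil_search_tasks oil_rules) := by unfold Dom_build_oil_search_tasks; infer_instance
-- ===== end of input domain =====

-- B replaces A's per-head rescans of the rule list with one grouping pass into a
-- dict (lowercased head -> quoted phrases); same return value (objective: alternative).

-- ===== PORT A =====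
-- _quote_query_phrase
def pvQuote (phrase : String) : String :=
  "\"" ++ PySem.Str.replace phrase "\"" "" ++ "\""

-- inner 'for rule in rules' loop of _phrases_from_rules; Bool = early 'return phrases'
def pvInnerA (head : String) (limit : Int) : List (List String) → List String → List String × Bool
  | [], phrases => (phrases, false)
  | r :: rs, phrases =>
    if r.length < 2 then pvInnerA head limit rs phrases
    else if PySem.Str.lower (r.getD 0 "") ≠ PySem.Str.lower head then
      pvInnerA head limit rs phrases
    else
      -- indices 0 and 1 are in range here (length ≥ 2), so getD is exact
      let phrase := PySem.Str.strip (r.getD 0 "" ++ " " ++ r.getD 1 "")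
      let phrases' := phrases ++ [pvQuote phrase]
      if limit ≤ (phrases'.length : Int) then (phrases', true)
      else pvInnerA head limit rs phrases'

-- outer 'for head in preferred_heads' loop of _phrases_from_rules
def pvPhrasesA (rules : List (List String)) (limit : Int) : List String → List String → List String
  | [], phrases => phrases
  | h :: hs, phrases =>
    match pvInnerA h limit rules phrases with
    | (ps, true) => ps
    | (ps, false) => pvPhrasesA rules limit hs ps

def build_oil_search_tasks (oil_rules : List (List String)) : List String :=
  let s_rules := oil_rules.filter (fun r => decide (4 ≤ r.length) && (r.getD 3 "" == "S"))
  let supply_terms := pvPhrasesA s_rules 4 ["OPEC", "OPEC+", "Saudi", "EIA", "API", "crude"] []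
  let geopolitics_terms := pvPhrasesA s_rules 4 ["Iran", "Hormuz", "Strait", "Red Sea", "tanker"] []
  let supply_terms := if supply_terms.isEmpty then
      ["\"OPEC cut\"", "\"EIA inventory\"", "\"crude supply\""] else supply_terms
  let geopolitics_terms := if geopolitics_terms.isEmpty then
      ["\"Iran Hormuz\"", "\"Red Sea attack\"", "\"tanker attack\""] else geopolitics_terms
  ["(" ++ PySem.Str.join " OR " supply_terms ++ ") (oil OR crude OR Brent OR WTI)",
   "(" ++ PySem.Str.join " OR " geopolitics_terms ++ ") (oil OR crude OR tanker)"]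

-- ===== PORT B =====
-- the already-quoted phrase B stores in the group of a kept rule
def pvPhraseB (r : List String) : String :=
  "\"" ++ PySem.Str.replace (PySem.Str.strip (r.getD 0 "" ++ " " ++ r.getD 1 "")) "\"" "" ++ "\""

-- B's single grouping pass: lowercased head -> list of quoted phrases, in order
def pvGroupsB (oil_rules : List (List String)) : PySem.Dict String (List String) :=
  oil_rules.foldl (fun d r =>
    if decide (4 ≤ r.length) && (r.getD 3 "" == "S") then
      d.modify (PySem.Str.lower (r.getD 0 "")) [] (· ++ [pvPhraseB r])
    else d) PySem.Dict.empty

-- B's inner 'for p in groups.get(head.lower(), [])' loop; Bool = early 'return out'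
def pvConsumeB (limit : Int) : List String → List String → List String × Bool
  | [], out => (out, false)
  | p :: ps, out =>
    let out' := out ++ [p]
    if limit ≤ (out'.length : Int) then (out', true) else pvConsumeB limit ps out'

-- B's 'pick' over the preferred heads
def pvPickB (groups : PySem.Dict String (List String)) (limit : Int) :
    List String → List String → List String
  | [], out => out
  | h :: hs, out =>
    match pvConsumeB limit (groups.getD (PySem.Str.lower h) []) out with
    | (out', true) => out'
    | (out', false) => pvPickB groups limit hs out'

def build_oil_search_tasks_alt (oil_rules : List (List String)) : List String :=
  let groups := pvGroupsB oil_rules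
  let supply0 := pvPickB groups 4 ["OPEC", "OPEC+", "Saudi", "EIA", "API", "crude"] []
  let geo0 := pvPickB groups 4 ["Iran", "Hormuz", "Strait", "Red Sea", "tanker"] []
  let supply := if supply0.isEmpty then
      ["\"OPEC cut\"", "\"EIA inventory\"", "\"crude supply\""] else supply0
  let geo := if geo0.isEmpty then
      ["\"Iran Hormuz\"", "\"Red Sea attack\"", "\"tanker attack\""] else geo0
  ["(" ++ PySem.Str.join " OR " supply ++ ") (oil OR crude OR Brent OR WTI)",
   "(" ++ PySem.Str.join " OR " geo ++ ") (oil OR crude OR tanker)"]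

-- ===== PRECONDITION & SPEC =====
def Spec_build_oil_search_tasks (oil_rules : List (List String)) (out : List String) : Prop := out = build_oil_search_tasks_alt oil_rules
instance (oil_rules : List (List String)) (out : List String) : Decidable (Spec_build_oil_search_tasks oil_rules out) := by unfold Spec_build_oil_search_tasks; infer_instance

-- ===== CLAIM (what is proved, stated in full; the proofs are below) =====
def Claim_equal_build_oil_search_tasks : Prop := ∀ (oil_rules : List (List String)), Dom_build_oil_search_tasks oil_rules → Spec_build_oil_search_tasks oil_rules (build_oil_search_tasks oil_rules)

-- ===== LEMMAS AND PROOFS =====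

-- the rule filter shared by both programs (A's list comprehension / B's grouping guard)
def pvKeep (r : List String) : Bool := decide (4 ≤ r.length) && (r.getD 3 "" == "S")

-- B's group for key k is exactly the kept rules with that lowercased head, mapped to phrases
lemma pvGroupsB_getD (oil_rules : List (List String)) (k : String) :
    (pvGroupsB oil_rules).getD k [] =
      ((oil_rules.filter pvKeep).filter
        (fun r => PySem.Str.lower (r.getD 0 "") == k)).map pvPhraseB := by
  unfold pvGroupsB
  rw [show (fun (d : PySem.Dict String (List String)) (r : List String) =>
        if decide (4 ≤ r.length) && (r.getD 3 "" == "S") then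
          d.modify (PySem.Str.lower (r.getD 0 "")) [] (· ++ [pvPhraseB r])
        else d)
      = (fun d r => if pvKeep r then
          d.modify (PySem.Str.lower (r.getD 0 "")) [] (· ++ [pvPhraseB r]) else d) from rfl,
    ← List.foldl_filter]
  have hfold : ∀ (l : List (List String)) (d : PySem.Dict String (List String)),
      l.foldl (fun d r => d.modify (PySem.Str.lower (r.getD 0 "")) [] (· ++ [pvPhraseB r])) d
        = ((l.map (fun r => (PySem.Str.lower (r.getD 0 ""), pvPhraseB r))).foldl
            (fun (d : PySem.Dict String (List String)) p => d.modify p.1 [] (· ++ [p.2])) d) := by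
    intro l
    induction l with
    | nil => intro d; rfl
    | cons x xs ih => intro d; simp only [List.foldl_cons, List.map_cons]; exact ih _
  rw [hfold, PySem.Dict.getD_foldl_modify_append]
  simp [List.filter_map, List.map_map, Function.comp]

-- A's inner rule scan for one head equals B's consumption of that head's group list
lemma innerA_eq_consume (head : String) (limit : Int) :
    ∀ (rules : List (List String)), (∀ r ∈ rules, 2 ≤ r.length) → ∀ acc,
      pvInnerA head limit rules acc =
        pvConsumeB limit
          ((rules.filter (fun r => PySem.Str.lower (r.getD 0 "") == PySem.Str.lower head)).map
            pvPhraseB) acc := by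
  intro rules
  induction rules with
  | nil => intro _ acc; simp [pvInnerA, pvConsumeB]
  | cons r rs ih =>
    intro hlen acc
    have h2 : ¬ r.length < 2 := by
      have := hlen r (List.mem_cons_self ..); omega
    by_cases hmatch : PySem.Str.lower (r.getD 0 "") = PySem.Str.lower head
    · simp only [pvInnerA, if_neg h2, hmatch, ne_eq, not_true_eq_false, if_false,
        List.filter_cons, beq_self_eq_true, if_true, List.map_cons]
      simp only [pvConsumeB]
      have hq : pvQuote (PySem.Str.strip (r.getD 0 "" ++ " " ++ r.getD 1 "")) = pvPhraseB r := rfl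
      rw [hq]
      split
      · rfl
      · exact ih (fun x hx => hlen x (List.mem_cons_of_mem _ hx)) _
    · have hne : (PySem.Str.lower (r.getD 0 "") == PySem.Str.lower head) = false :=
        beq_eq_false_iff_ne.mpr hmatch
      simp only [pvInnerA, if_neg h2, ne_eq, hmatch, not_false_eq_true, if_true,
        List.filter_cons, hne, Bool.false_eq_true, if_false]
      exact ih (fun x hx => hlen x (List.mem_cons_of_mem _ hx)) acc

-- A's head loop over the filtered rules equals B's pick over the grouping dict
lemma phrasesA_eq_pickB (oil_rules : List (List String)) (limit : Int) :
    ∀ (heads : List String) (acc : List String),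
      pvPhrasesA (oil_rules.filter pvKeep) limit heads acc =
        pvPickB (pvGroupsB oil_rules) limit heads acc := by
  have hlen : ∀ r ∈ oil_rules.filter pvKeep, 2 ≤ r.length := by
    intro r hr
    have := List.of_mem_filter hr
    simp only [pvKeep, Bool.and_eq_true, decide_eq_true_eq] at this
    omega
  intro heads
  induction heads with
  | nil => intro acc; simp [pvPhrasesA, pvPickB]
  | cons h hs ih =>
    intro acc
    simp only [pvPhrasesA, pvPickB]
    rw [innerA_eq_consume h limit _ hlen acc, pvGroupsB_getD]
    cases pvConsumeB limit
        (((oil_rules.filter pvKeep).filter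
          (fun r => PySem.Str.lower (r.getD 0 "") == PySem.Str.lower h)).map pvPhraseB) acc with
    | mk ps done =>
      cases done with
      | true => rfl
      | false => exact ih ps

-- ===== VERDICT (by name: the statement is the Claim_ definition above) =====
theorem build_oil_search_tasks_spec : Claim_equal_build_oil_search_tasks := by
  intro oil_rules _
  unfold Spec_build_oil_search_tasks build_oil_search_tasks build_oil_search_tasks_alt
  have h := phrasesA_eq_pickB oil_rules 4
  rw [show (fun (r : List String) => decide (4 ≤ r.length) && (r.getD 3 "" == "S")) = pvKeep from rfl]
  simp only [h]
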